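-- pv_equiv track=rewrite | github.com/ogiekako/pub_polycover | hardness/verify_rust_candidates.py | unique_isometries_norm
-- ===== SOURCE A (Python) =====
-- def bbox(cells):
--     xs = [x for x, _ in cells]
--     ys = [y for _, y in cells]
--     return min(xs), max(xs), min(ys), max(ys)
--
-- def normalize(cells):
--     mnx, _, mny, _ = bbox(cells)
--     return {(x - mnx, y - mny) for x, y in cells}
--
-- def rot90(cells, n):
--     return {(n - 1 - y, x) for x, y in cells}
--
-- def rot180(cells, n):
--     return {(n - 1 - x, n - 1 - y) for x, y in cells}
--
-- def rot270(cells, n):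
--     return {(y, n - 1 - x) for x, y in cells}
--
-- def reflx(cells, n):
--     return {(n - 1 - x, y) for x, y in cells}
--
-- def unique_isometries_norm(cells, n):
--     r0 = cells
--     r1 = rot90(r0, n)
--     r2 = rot180(r0, n)
--     r3 = rot270(r0, n)
--     f0 = reflx(r0, n)
--     f1 = rot90(f0, n)
--     f2 = rot180(f0, n)
--     f3 = rot270(f0, n)
--     out = []
--     seen = set()
--     for v in (r0, r1, r2, r3, f0, f1, f2, f3):
--         vn = frozenset(normalize(v))
--         if vn not in seen:
--             seen.add(vn)
--             out.append(set(vn))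
--     return out
-- ===== SOURCE B (Python) =====
-- def unique_isometries_norm(cells, n):
--     # The bounding box is computed once; each of the 8 dihedral images, already
--     # translation-normalized, is a direct closed-form coordinate map of the
--     # original cells (n cancels out of every normalized image).
--     mnx = min(x for x, _ in cells)
--     mxx = max(x for x, _ in cells)
--     mny = min(y for _, y in cells)
--     mxy = max(y for _, y in cells)
--     maps = [
--         lambda x, y: (x - mnx, y - mny),
--         lambda x, y: (mxy - y, x - mnx),
--         lambda x, y: (mxx - x, mxy - y),
--         lambda x, y: (y - mny, mxx - x),
--         lambda x, y: (mxx - x, y - mny),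
--         lambda x, y: (mxy - y, mxx - x),
--         lambda x, y: (x - mnx, mxy - y),
--         lambda x, y: (y - mny, x - mnx),
--     ]
--     out = []
--     seen = set()
--     for f in maps:
--         vn = frozenset(f(x, y) for x, y in cells)
--         if vn not in seen:
--             seen.add(vn)
--             out.append(set(vn))
--     return out
-- ===== Notes on version B (the rewrite author's own statement) =====
-- stated objective: alternative
-- what changed: B computes the bounding box once and emits each of the eight normalized dihedral images as a direct closed-form coordinate map of the original cells (n cancels out of every normalized image), instead of A's per-variant rotate-on-the-n-grid followed by a fresh bbox computation and renormalization.
import Mathlib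
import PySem

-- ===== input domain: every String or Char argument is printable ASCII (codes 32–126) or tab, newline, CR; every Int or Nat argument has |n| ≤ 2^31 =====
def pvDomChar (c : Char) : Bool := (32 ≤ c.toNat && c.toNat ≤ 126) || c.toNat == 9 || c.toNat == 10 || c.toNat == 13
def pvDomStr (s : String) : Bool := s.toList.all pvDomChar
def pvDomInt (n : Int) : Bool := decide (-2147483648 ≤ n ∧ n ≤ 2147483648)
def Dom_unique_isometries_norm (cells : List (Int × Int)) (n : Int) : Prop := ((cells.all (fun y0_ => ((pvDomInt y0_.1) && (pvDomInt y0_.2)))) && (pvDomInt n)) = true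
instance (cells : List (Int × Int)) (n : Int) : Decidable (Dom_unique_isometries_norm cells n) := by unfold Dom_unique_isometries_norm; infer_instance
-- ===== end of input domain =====

-- B computes the bounding box once and produces each of the 8 normalized dihedral
-- images by a direct closed-form coordinate map (n cancels out of every normalized
-- image), instead of A's rotate-on-the-n-grid-then-renormalize per variant; objective: simpler.
-- Pre_ excludes the empty cell list, on which A raises ValueError (min of an empty
-- sequence); B raises there too.


-- ===== PORT A =====
-- min/max(xs): Python raises ValueError on []; the `.getD 0` default is reached only outside Pre_.
def pvMin (xs : List Int) : Int := (PySem.List.min? xs (fun x => x)).getD 0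
def pvMax (xs : List Int) : Int := (PySem.List.max? xs (fun x => x)).getD 0

def pvBbox (cells : List (Int × Int)) : Int × Int × Int × Int :=
  let xs := cells.map (fun p => p.1)
  let ys := cells.map (fun p => p.2)
  (pvMin xs, pvMax xs, pvMin ys, pvMax ys)

def pvNormalize (cells : List (Int × Int)) : PySem.Set (Int × Int) :=
  let b := pvBbox cells
  PySem.Set.ofList (cells.map (fun p => (p.1 - b.1, p.2 - b.2.2.1)))

def pvRot90 (cells : List (Int × Int)) (n : Int) : PySem.Set (Int × Int) :=
  PySem.Set.ofList (cells.map (fun p => (n - 1 - p.2, p.1)))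

def pvRot180 (cells : List (Int × Int)) (n : Int) : PySem.Set (Int × Int) :=
  PySem.Set.ofList (cells.map (fun p => (n - 1 - p.1, n - 1 - p.2)))

def pvRot270 (cells : List (Int × Int)) (n : Int) : PySem.Set (Int × Int) :=
  PySem.Set.ofList (cells.map (fun p => (p.2, n - 1 - p.1)))

def pvReflx (cells : List (Int × Int)) (n : Int) : PySem.Set (Int × Int) :=
  PySem.Set.ofList (cells.map (fun p => (n - 1 - p.1, p.2)))

def unique_isometries_norm (cells : List (Int × Int)) (n : Int) : List (List (Int × Int)) :=
  let r0 := cells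
  let r1 := pvRot90 r0 n
  let r2 := pvRot180 r0 n
  let r3 := pvRot270 r0 n
  let f0 := pvReflx r0 n
  let f1 := pvRot90 f0 n
  let f2 := pvRot180 f0 n
  let f3 := pvRot270 f0 n
  -- seen is a set of frozensets compared by set equality: membership is Set.equal against each
  (([r0, r1, r2, r3, f0, f1, f2, f3]).foldl
    (fun (st : List (List (Int × Int)) × List (List (Int × Int))) v =>
      let vn := pvNormalize v
      if st.2.any (fun s => PySem.Set.equal s vn) then st
      else (st.1 ++ [vn], st.2 ++ [vn]))
    ([], [])).1

-- ===== PORT B =====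
-- min/max(...): Python raises ValueError on an empty generator; `.getD 0` is reached only outside Pre_.
def unique_isometries_norm_alt (cells : List (Int × Int)) (n : Int) : List (List (Int × Int)) :=
  let mnx := (PySem.List.min? (cells.map (fun p => p.1)) (fun x => x)).getD 0
  let mxx := (PySem.List.max? (cells.map (fun p => p.1)) (fun x => x)).getD 0
  let mny := (PySem.List.min? (cells.map (fun p => p.2)) (fun x => x)).getD 0
  let mxy := (PySem.List.max? (cells.map (fun p => p.2)) (fun x => x)).getD 0
  let maps : List (Int → Int → Int × Int) :=
    [fun x y => (x - mnx, y - mny),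
     fun x y => (mxy - y, x - mnx),
     fun x y => (mxx - x, mxy - y),
     fun x y => (y - mny, mxx - x),
     fun x y => (mxx - x, y - mny),
     fun x y => (mxy - y, mxx - x),
     fun x y => (x - mnx, mxy - y),
     fun x y => (y - mny, x - mnx)]
  (maps.foldl
    (fun (st : List (List (Int × Int)) × List (List (Int × Int))) f =>
      let vn := PySem.Set.ofList (cells.map (fun p => f p.1 p.2))
      if st.2.any (fun s => PySem.Set.equal s vn) then st
      else (st.1 ++ [vn], st.2 ++ [vn]))
    ([], [])).1

-- ===== PRECONDITION & SPEC =====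
-- Pre_ excludes the empty list of cells, on which Python's min of an empty sequence raises ValueError (in A and in B).
def Pre_unique_isometries_norm (cells : List (Int × Int)) (n : Int) : Prop := cells ≠ []
instance (cells : List (Int × Int)) (n : Int) : Decidable (Pre_unique_isometries_norm cells n) := by unfold Pre_unique_isometries_norm; infer_instance

def pvWitness_unique_isometries_norm : (List (Int × Int)) × Int := ([(0, 0), (1, 0)], 2)

def Spec_unique_isometries_norm (cells : List (Int × Int)) (n : Int) (out : List (List (Int × Int))) : Prop := out = unique_isometries_norm_alt cells n
instance (cells : List (Int × Int)) (n : Int) (out : List (List (Int × Int))) : Decidable (Spec_unique_isometries_norm cells n out) := by unfold Spec_unique_isometries_norm; infer_instance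

-- ===== CLAIM =====
def Claim_equal_unique_isometries_norm : Prop := ∀ (cells : List (Int × Int)) (n : Int), Dom_unique_isometries_norm cells n → Pre_unique_isometries_norm cells n → Spec_unique_isometries_norm cells n (unique_isometries_norm cells n)

-- ===== LEMMAS AND PROOFS =====

-- deduplicating before a mapped re-deduplication changes nothing
theorem ofList_map_ofList {α β : Type} [BEq α] [LawfulBEq α] [BEq β] [LawfulBEq β]
    (f : α → β) (l : List α) :
    PySem.Set.ofList (List.map f (PySem.Set.ofList l)) = PySem.Set.ofList (List.map f l) := by
  induction l using List.reverseRecOn with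
  | nil => rfl
  | append_singleton l x ih =>
    rw [List.map_append, List.map_singleton, PySem.Set.ofList_append_singleton]
    by_cases hx : x ∈ l
    · have hc : PySem.Set.add (PySem.Set.ofList l) x = PySem.Set.ofList l := by
        rw [PySem.Set.add, if_pos (by rw [PySem.Set.contains_iff, PySem.Set.mem_ofList]; exact hx)]
      rw [hc, ih, PySem.Set.ofList_append_singleton, PySem.Set.add,
          if_pos (by rw [PySem.Set.contains_iff, PySem.Set.mem_ofList]; exact List.mem_map_of_mem hx)]
    · have hc : PySem.Set.add (PySem.Set.ofList l) x = PySem.Set.ofList l ++ [x] := by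
        rw [PySem.Set.add, if_neg (by rw [PySem.Set.contains_iff, PySem.Set.mem_ofList]; exact hx)]
      rw [hc, List.map_append, List.map_singleton, PySem.Set.ofList_append_singleton,
          PySem.Set.ofList_append_singleton, ih]

-- lists with the same members have the same min value (id key)
theorem min_congr_mem (l1 l2 : List Int) (h : ∀ x, x ∈ l1 ↔ x ∈ l2) :
    PySem.List.min? l1 (fun x => x) = PySem.List.min? l2 (fun x => x) := by
  rcases hl1 : PySem.List.min? l1 (fun x => x) with _ | m1
  · rw [PySem.List.min?_eq_none_iff] at hl1
    subst hl1
    symm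
    rw [PySem.List.min?_eq_none_iff, List.eq_nil_iff_forall_not_mem]
    intro x hx
    exact (List.not_mem_nil) ((h x).mpr hx)
  · rcases hl2 : PySem.List.min? l2 (fun x => x) with _ | m2
    · rw [PySem.List.min?_eq_none_iff] at hl2
      subst hl2
      exact absurd ((h m1).mp (PySem.List.min?_mem hl1)) (List.not_mem_nil)
    · have h1 := PySem.List.min?_isMin hl1 m2 ((h m2).mpr (PySem.List.min?_mem hl2))
      have h2 := PySem.List.min?_isMin hl2 m1 ((h m1).mp (PySem.List.min?_mem hl1))
      exact congrArg some (le_antisymm h1 h2)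

theorem foldl_min_sub (c : Int) (t : List Int) : ∀ x : Int,
    List.foldl min (c - x) (t.map (fun v => c - v)) = c - List.foldl max x t := by
  induction t with
  | nil => intro x; simp
  | cons a t ih =>
    intro x
    simp only [List.map_cons, List.foldl_cons]
    have : min (c - x) (c - a) = c - max x a := by omega
    rw [this, ih]

theorem min_sub (c : Int) (l : List Int) :
    PySem.List.min? (l.map (fun v => c - v)) (fun x => x) =
      (PySem.List.max? l (fun x => x)).map (fun m => c - m) := by
  cases l with
  | nil => rfl
  | cons x t =>
    rw [List.map_cons, PySem.List.min?_id_cons, PySem.List.max?_id_cons]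
    exact congrArg some (foldl_min_sub c t x)

-- the dedup body shared by both folds
def pvStep (st : List (List (Int × Int)) × List (List (Int × Int)))
    (vn : List (Int × Int)) : List (List (Int × Int)) × List (List (Int × Int)) :=
  if st.2.any (fun s => PySem.Set.equal s vn) then st
  else (st.1 ++ [vn], st.2 ++ [vn])

-- bbox value abbreviations (proof-only helpers)
def mnxD (cells : List (Int × Int)) : Int := (PySem.List.min? (cells.map (fun p => p.1)) (fun x => x)).getD 0
def mxxD (cells : List (Int × Int)) : Int := (PySem.List.max? (cells.map (fun p => p.1)) (fun x => x)).getD 0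
def mnyD (cells : List (Int × Int)) : Int := (PySem.List.min? (cells.map (fun p => p.2)) (fun x => x)).getD 0
def mxyD (cells : List (Int × Int)) : Int := (PySem.List.max? (cells.map (fun p => p.2)) (fun x => x)).getD 0

theorem max?_eq_some_getD (l : List Int) (h : l ≠ []) :
    PySem.List.max? l (fun x => x) = some ((PySem.List.max? l (fun x => x)).getD 0) := by
  cases hm : PySem.List.max? l (fun x => x) with
  | none => exact absurd ((PySem.List.max?_eq_none_iff _ _).mp hm) h
  | some m => rfl

theorem pvMin_sub_fst (cells : List (Int × Int)) (c m : Int)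
    (hm : PySem.List.max? (cells.map (fun p => p.1)) (fun x => x) = some m) :
    pvMin (cells.map (fun p => c - p.1)) = c - m := by
  have h : cells.map (fun p => c - p.1) = (cells.map (fun p => p.1)).map (fun v => c - v) := by
    simp [List.map_map]
  rw [pvMin, h, min_sub, hm]; rfl

theorem pvMin_sub_snd (cells : List (Int × Int)) (c m : Int)
    (hm : PySem.List.max? (cells.map (fun p => p.2)) (fun x => x) = some m) :
    pvMin (cells.map (fun p => c - p.2)) = c - m := by
  have h : cells.map (fun p => c - p.2) = (cells.map (fun p => p.2)).map (fun v => c - v) := by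
    simp [List.map_map]
  rw [pvMin, h, min_sub, hm]; rfl

theorem pvNormMap (cells : List (Int × Int)) (f : Int × Int → Int × Int) (a b : Int)
    (ha : pvMin (cells.map (fun p => (f p).1)) = a)
    (hb : pvMin (cells.map (fun p => (f p).2)) = b) :
    pvNormalize (PySem.Set.ofList (cells.map f)) =
      PySem.Set.ofList (cells.map (fun p => ((f p).1 - a, (f p).2 - b))) := by
  unfold pvNormalize pvBbox
  have hmem1 : ∀ x : Int, x ∈ (PySem.Set.ofList (cells.map f) : List (Int × Int)).map (fun p => p.1) ↔
      x ∈ cells.map (fun p => (f p).1) := by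
    intro x
    constructor
    · intro hx
      rcases List.mem_map.mp hx with ⟨p, hp, rfl⟩
      rcases List.mem_map.mp ((PySem.List.mem_dedup _ _).mp hp) with ⟨q, hq, rfl⟩
      exact List.mem_map.mpr ⟨q, hq, rfl⟩
    · intro hx
      rcases List.mem_map.mp hx with ⟨q, hq, rfl⟩
      exact List.mem_map.mpr ⟨f q, (PySem.List.mem_dedup _ _).mpr (List.mem_map.mpr ⟨q, hq, rfl⟩), rfl⟩
  have hmem2 : ∀ x : Int, x ∈ (PySem.Set.ofList (cells.map f) : List (Int × Int)).map (fun p => p.2) ↔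
      x ∈ cells.map (fun p => (f p).2) := by
    intro x
    constructor
    · intro hx
      rcases List.mem_map.mp hx with ⟨p, hp, rfl⟩
      rcases List.mem_map.mp ((PySem.List.mem_dedup _ _).mp hp) with ⟨q, hq, rfl⟩
      exact List.mem_map.mpr ⟨q, hq, rfl⟩
    · intro hx
      rcases List.mem_map.mp hx with ⟨q, hq, rfl⟩
      exact List.mem_map.mpr ⟨f q, (PySem.List.mem_dedup _ _).mpr (List.mem_map.mpr ⟨q, hq, rfl⟩), rfl⟩
  simp only [pvMin] at ha hb
  simp only [pvMin, min_congr_mem _ _ hmem1, min_congr_mem _ _ hmem2, ha, hb]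
  rw [ofList_map_ofList, List.map_map]
  rfl

theorem A_shape (cells : List (Int × Int)) (n : Int) :
    unique_isometries_norm cells n =
      (List.foldl pvStep ([], [])
        [pvNormalize cells,
         pvNormalize (pvRot90 cells n),
         pvNormalize (pvRot180 cells n),
         pvNormalize (pvRot270 cells n),
         pvNormalize (pvReflx cells n),
         pvNormalize (pvRot90 (pvReflx cells n) n),
         pvNormalize (pvRot180 (pvReflx cells n) n),
         pvNormalize (pvRot270 (pvReflx cells n) n)]).1 := rfl

theorem B_shape (cells : List (Int × Int)) (n : Int) :
    unique_isometries_norm_alt cells n =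
      (List.foldl pvStep ([], [])
        [PySem.Set.ofList (cells.map (fun p => (p.1 - mnxD cells, p.2 - mnyD cells))),
         PySem.Set.ofList (cells.map (fun p => (mxyD cells - p.2, p.1 - mnxD cells))),
         PySem.Set.ofList (cells.map (fun p => (mxxD cells - p.1, mxyD cells - p.2))),
         PySem.Set.ofList (cells.map (fun p => (p.2 - mnyD cells, mxxD cells - p.1))),
         PySem.Set.ofList (cells.map (fun p => (mxxD cells - p.1, p.2 - mnyD cells))),
         PySem.Set.ofList (cells.map (fun p => (mxyD cells - p.2, mxxD cells - p.1))),
         PySem.Set.ofList (cells.map (fun p => (p.1 - mnxD cells, mxyD cells - p.2))),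
         PySem.Set.ofList (cells.map (fun p => (p.2 - mnyD cells, p.1 - mnxD cells)))]).1 := rfl

-- ===== VERDICT =====
theorem unique_isometries_norm_spec : Claim_equal_unique_isometries_norm := by
  intro cells n _ hne
  unfold Spec_unique_isometries_norm
  have hxne : cells.map (fun p : Int × Int => p.1) ≠ [] := by simpa using hne
  have hyne : cells.map (fun p : Int × Int => p.2) ≠ [] := by simpa using hne
  have hmx : PySem.List.max? (cells.map (fun p => p.1)) (fun x => x) = some (mxxD cells) :=
    max?_eq_some_getD _ hxne
  have hmy : PySem.List.max? (cells.map (fun p => p.2)) (fun x => x) = some (mxyD cells) :=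
    max?_eq_some_getD _ hyne
  rw [A_shape, B_shape]
  -- r0
  have e0 : pvNormalize cells =
      PySem.Set.ofList (cells.map (fun p => (p.1 - mnxD cells, p.2 - mnyD cells))) := rfl
  -- r1 = rot90
  have e1 : pvNormalize (pvRot90 cells n) =
      PySem.Set.ofList (cells.map (fun p => (mxyD cells - p.2, p.1 - mnxD cells))) := by
    have h := pvNormMap cells (fun p => (n - 1 - p.2, p.1)) (n - 1 - mxyD cells) (mnxD cells)
      (pvMin_sub_snd cells (n - 1) _ hmy) rfl
    rw [show pvRot90 cells n = PySem.Set.ofList (cells.map (fun p => (n - 1 - p.2, p.1))) from rfl, h]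
    exact congrArg _ (List.map_congr_left (fun p _ => by simp only [Prod.mk.injEq, and_true, true_and]; omega))
  -- r2 = rot180
  have e2 : pvNormalize (pvRot180 cells n) =
      PySem.Set.ofList (cells.map (fun p => (mxxD cells - p.1, mxyD cells - p.2))) := by
    have h := pvNormMap cells (fun p => (n - 1 - p.1, n - 1 - p.2)) (n - 1 - mxxD cells) (n - 1 - mxyD cells)
      (pvMin_sub_fst cells (n - 1) _ hmx) (pvMin_sub_snd cells (n - 1) _ hmy)
    rw [show pvRot180 cells n = PySem.Set.ofList (cells.map (fun p => (n - 1 - p.1, n - 1 - p.2))) from rfl, h]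
    exact congrArg _ (List.map_congr_left (fun p _ => by simp only [Prod.mk.injEq, and_true, true_and]; omega))
  -- r3 = rot270
  have e3 : pvNormalize (pvRot270 cells n) =
      PySem.Set.ofList (cells.map (fun p => (p.2 - mnyD cells, mxxD cells - p.1))) := by
    have h := pvNormMap cells (fun p => (p.2, n - 1 - p.1)) (mnyD cells) (n - 1 - mxxD cells)
      rfl (pvMin_sub_fst cells (n - 1) _ hmx)
    rw [show pvRot270 cells n = PySem.Set.ofList (cells.map (fun p => (p.2, n - 1 - p.1))) from rfl, h]
    exact congrArg _ (List.map_congr_left (fun p _ => by simp only [Prod.mk.injEq, and_true, true_and]; omega))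
  -- f0 = reflx
  have e4 : pvNormalize (pvReflx cells n) =
      PySem.Set.ofList (cells.map (fun p => (mxxD cells - p.1, p.2 - mnyD cells))) := by
    have h := pvNormMap cells (fun p => (n - 1 - p.1, p.2)) (n - 1 - mxxD cells) (mnyD cells)
      (pvMin_sub_fst cells (n - 1) _ hmx) rfl
    rw [show pvReflx cells n = PySem.Set.ofList (cells.map (fun p => (n - 1 - p.1, p.2))) from rfl, h]
    exact congrArg _ (List.map_congr_left (fun p _ => by simp only [Prod.mk.injEq, and_true, true_and]; omega))
  -- f1 = rot90 of reflx
  have hf1 : pvRot90 (pvReflx cells n) n =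
      PySem.Set.ofList (cells.map (fun p => (n - 1 - p.2, n - 1 - p.1))) := by
    show PySem.Set.ofList (List.map _ (PySem.Set.ofList (cells.map (fun p => (n - 1 - p.1, p.2))))) = _
    rw [ofList_map_ofList, List.map_map]
    rfl
  have e5 : pvNormalize (pvRot90 (pvReflx cells n) n) =
      PySem.Set.ofList (cells.map (fun p => (mxyD cells - p.2, mxxD cells - p.1))) := by
    have h := pvNormMap cells (fun p => (n - 1 - p.2, n - 1 - p.1)) (n - 1 - mxyD cells) (n - 1 - mxxD cells)
      (pvMin_sub_snd cells (n - 1) _ hmy) (pvMin_sub_fst cells (n - 1) _ hmx)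
    rw [hf1, h]
    exact congrArg _ (List.map_congr_left (fun p _ => by simp only [Prod.mk.injEq, and_true, true_and]; omega))
  -- f2 = rot180 of reflx
  have hf2 : pvRot180 (pvReflx cells n) n =
      PySem.Set.ofList (cells.map (fun p => (p.1, n - 1 - p.2))) := by
    show PySem.Set.ofList (List.map _ (PySem.Set.ofList (cells.map (fun p => (n - 1 - p.1, p.2))))) = _
    rw [ofList_map_ofList, List.map_map]
    exact congrArg _ (List.map_congr_left (fun p _ => by simp only [Function.comp, Prod.mk.injEq, and_true, true_and]; omega))
  have e6 : pvNormalize (pvRot180 (pvReflx cells n) n) =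
      PySem.Set.ofList (cells.map (fun p => (p.1 - mnxD cells, mxyD cells - p.2))) := by
    have h := pvNormMap cells (fun p => (p.1, n - 1 - p.2)) (mnxD cells) (n - 1 - mxyD cells)
      rfl (pvMin_sub_snd cells (n - 1) _ hmy)
    rw [hf2, h]
    exact congrArg _ (List.map_congr_left (fun p _ => by simp only [Prod.mk.injEq, and_true, true_and]; omega))
  -- f3 = rot270 of reflx
  have hf3 : pvRot270 (pvReflx cells n) n =
      PySem.Set.ofList (cells.map (fun p => (p.2, p.1))) := by
    show PySem.Set.ofList (List.map _ (PySem.Set.ofList (cells.map (fun p => (n - 1 - p.1, p.2))))) = _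
    rw [ofList_map_ofList, List.map_map]
    exact congrArg _ (List.map_congr_left (fun p _ => by simp only [Function.comp, Prod.mk.injEq, and_true, true_and]; omega))
  have e7 : pvNormalize (pvRot270 (pvReflx cells n) n) =
      PySem.Set.ofList (cells.map (fun p => (p.2 - mnyD cells, p.1 - mnxD cells))) := by
    have h := pvNormMap cells (fun p => (p.2, p.1)) (mnyD cells) (mnxD cells) rfl rfl
    rw [hf3, h]
  rw [e0, e1, e2, e3, e4, e5, e6, e7]
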